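-- pv_equiv track=rewrite | github.com/maximromanov/jedli | modules/frequency_list.py | make_rank_dict
-- ===== SOURCE A (Python) =====
-- def make_rank_dict(count_dict):
--     """make a dictionary that contains the rank of every value
--     in the count_dict"""
--
--     last_val = None
--     rank_dict = {}
--     i = 1
--     for key, val in sorted(count_dict.items(), key=lambda item:item[1], reverse=True):
--         if last_val != val:
--             last_val = val
--             rank_dict[val] = i
--             i += 1
--     return rank_dict
-- ===== SOURCE B (Python) =====
-- def make_rank_dict(count_dict):
--     """make a dictionary that contains the rank of every value
--     in the count_dict"""
--     return {v: i + 1 for i, v in enumerate(sorted(set(count_dict.values()), reverse=True))}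
-- ===== Notes on version B (the rewrite author's own statement) =====
-- stated objective: simpler
-- what changed: Replaces the stateful last_val dedup scan over all n sorted items with a one-line comprehension: deduplicate the count values with set() first, sort only the k distinct values descending, and read each rank off the enumeration index.
import Mathlib
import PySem

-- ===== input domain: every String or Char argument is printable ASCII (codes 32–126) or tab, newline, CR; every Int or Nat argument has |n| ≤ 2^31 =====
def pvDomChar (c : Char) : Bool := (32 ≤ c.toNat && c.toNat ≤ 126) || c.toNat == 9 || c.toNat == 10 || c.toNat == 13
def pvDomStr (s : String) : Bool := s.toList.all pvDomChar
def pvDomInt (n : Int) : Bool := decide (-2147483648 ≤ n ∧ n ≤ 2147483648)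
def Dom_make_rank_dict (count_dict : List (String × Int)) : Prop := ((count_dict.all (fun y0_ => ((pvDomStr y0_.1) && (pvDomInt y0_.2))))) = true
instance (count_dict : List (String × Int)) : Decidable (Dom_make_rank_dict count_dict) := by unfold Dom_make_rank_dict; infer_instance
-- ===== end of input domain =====

-- B replaces A's stateful last_val dedup scan by sorting the set of distinct values descending and
-- reading ranks off the enumeration index (objective: simpler).

-- ===== PORT A =====
-- body of A's for-loop: state (last_val, rank_dict, i), one sorted item kv
def rank_step (st : Option Int × PySem.Dict Int Int × Int) (kv : String × Int) :
    Option Int × PySem.Dict Int Int × Int :=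
  if st.1 ≠ some kv.2 then (some kv.2, PySem.Dict.insert st.2.1 kv.2 st.2.2, st.2.2 + 1) else st

def make_rank_dict (count_dict : List (String × Int)) : List (Int × Int) :=
  ((PySem.List.sorted count_dict (fun item => item.2) true).foldl rank_step
    (none, PySem.Dict.empty, 1)).2.1.items

-- ===== PORT B =====
def make_rank_dict_alt (count_dict : List (String × Int)) : List (Int × Int) :=
  let svals := PySem.List.sorted (PySem.Set.ofList (count_dict.map (fun kv => kv.2))) (fun v => v) true
  ((PySem.List.enumerate svals).foldl
    (fun d iv => PySem.Dict.insert d iv.2 (iv.1 + 1)) PySem.Dict.empty).items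

-- ===== PRECONDITION & SPEC =====
def Spec_make_rank_dict (count_dict : List (String × Int)) (out : List (Int × Int)) : Prop := out = make_rank_dict_alt count_dict
instance (count_dict : List (String × Int)) (out : List (Int × Int)) : Decidable (Spec_make_rank_dict count_dict out) := by unfold Spec_make_rank_dict; infer_instance

-- ===== CLAIM (what is proved, stated in full; the proofs are below) =====
def Claim_equal_make_rank_dict : Prop := ∀ (count_dict : List (String × Int)), Dom_make_rank_dict count_dict → Spec_make_rank_dict count_dict (make_rank_dict count_dict)

-- ===== LEMMAS AND PROOFS =====

-- consecutive dedup with explicit "last seen" state, mirroring A's last_val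
def cdd : Option Int → List Int → List Int
  | _, [] => []
  | l, v :: r => if l ≠ some v then v :: cdd (some v) r else cdd l r

lemma cdd_mem (vs : List Int) : ∀ (l : Option Int),
    vs.Pairwise (fun a b => b ≤ a) →
    (∀ x, l = some x → ∀ v ∈ vs, v ≤ x) →
    ∀ x, x ∈ cdd l vs ↔ (x ∈ vs ∧ l ≠ some x) := by
  induction vs with
  | nil => simp [cdd]
  | cons v r ih =>
    intro l hp hl x
    obtain ⟨hhd, hpr⟩ := List.pairwise_cons.mp hp
    have hl' : ∀ y, (some v : Option Int) = some y → ∀ w ∈ r, w ≤ y := by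
      intro y hy w hw
      have : v = y := by injection hy
      subst this
      exact hhd w hw
    by_cases hv : l = some v
    · subst hv
      have hred : cdd (some v) (v :: r) = cdd (some v) r := by simp [cdd]
      rw [hred, ih (some v) hpr hl' x]
      simp only [List.mem_cons, ne_eq]
      constructor
      · rintro ⟨hx, hne⟩; exact ⟨Or.inr hx, hne⟩
      · rintro ⟨hx, hne⟩
        rcases hx with rfl | hx
        · exact absurd rfl hne
        · exact ⟨hx, hne⟩
    · have hred : cdd l (v :: r) = v :: cdd (some v) r := by simp [cdd, hv]
      rw [hred]
      simp only [List.mem_cons, ne_eq]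
      rw [ih (some v) hpr hl' x]
      constructor
      · rintro (rfl | ⟨hx, hne⟩)
        · exact ⟨Or.inl rfl, fun h => hv h⟩
        · refine ⟨Or.inr hx, ?_⟩
          intro h
          rcases l with _ | y
          · cases h
          · have hyx : y = x := by injection h
            subst hyx
            have h1 : v ≤ y := hl y rfl v (by simp)
            have h3 : y ≤ v := hhd y hx
            have : y = v := le_antisymm h3 h1
            exact hne (by rw [this])
      · rintro ⟨hx, hne⟩
        rcases hx with rfl | hx
        · exact Or.inl rfl
        · by_cases hxv : x = v
          · exact Or.inl hxv
          · refine Or.inr ⟨hx, ?_⟩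
            intro h
            have : v = x := by injection h
            exact hxv this.symm

lemma cdd_pairwise_gt (vs : List Int) : ∀ (l : Option Int),
    vs.Pairwise (fun a b => b ≤ a) →
    (∀ x, l = some x → ∀ v ∈ vs, v ≤ x) →
    (cdd l vs).Pairwise (fun a b => b < a) := by
  induction vs with
  | nil => intro l _ _; simp [cdd]
  | cons v r ih =>
    intro l hp hl
    obtain ⟨hhd, hpr⟩ := List.pairwise_cons.mp hp
    have hl' : ∀ y, (some v : Option Int) = some y → ∀ w ∈ r, w ≤ y := by
      intro y hy w hw
      have : v = y := by injection hy
      subst this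
      exact hhd w hw
    by_cases hv : l = some v
    · have hred : cdd l (v :: r) = cdd (some v) r := by simp [cdd, hv]
      rw [hred]
      exact ih (some v) hpr hl'
    · have hred : cdd l (v :: r) = v :: cdd (some v) r := by simp [cdd, hv]
      rw [hred]
      refine List.pairwise_cons.mpr ⟨?_, ih (some v) hpr hl'⟩
      intro y hy
      obtain ⟨hyr, hyne⟩ := (cdd_mem r (some v) hpr hl' y).mp hy
      have h1 : y ≤ v := hhd y hyr
      have h2 : y ≠ v := fun h => hyne (by rw [h])
      omega

lemma foldA_items (s : List (String × Int)) : ∀ (l : Option Int) (d : PySem.Dict Int Int) (i : Int),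
    (s.map (fun kv => kv.2)).Pairwise (fun a b => b ≤ a) →
    (∀ x, l = some x → ∀ v ∈ s.map (fun kv => kv.2), v ≤ x) →
    (∀ v ∈ s.map (fun kv => kv.2), l ≠ some v → d.contains v = false) →
    (s.foldl rank_step (l, d, i)).2.1.items
      = d.items ++ (PySem.List.enumerate (cdd l (s.map (fun kv => kv.2))) i).map (fun iv => (iv.2, iv.1)) := by
  induction s with
  | nil => simp [cdd]
  | cons kv r ih =>
    intro l d i hp hl hc
    simp only [List.map_cons] at hp hl hc ⊢
    obtain ⟨hhd, hpr⟩ := List.pairwise_cons.mp hp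
    by_cases hv : l = some kv.2
    · have hstep : rank_step (l, d, i) kv = (l, d, i) := by simp [rank_step, hv]
      have hcdd : cdd l (kv.2 :: r.map (fun kv => kv.2)) = cdd l (r.map (fun kv => kv.2)) := by
        simp [cdd, hv]
      rw [List.foldl_cons, hstep, hcdd]
      exact ih l d i hpr
        (by intro x hx w hw
            rw [hv] at hx
            have : kv.2 = x := by injection hx
            subst this
            exact hhd w hw)
        (by intro w hw hne; exact hc w (List.mem_cons_of_mem _ hw) hne)
    · have hstep : rank_step (l, d, i) kv = (some kv.2, PySem.Dict.insert d kv.2 i, i + 1) := by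
        simp [rank_step, hv]
      have hfresh : d.contains kv.2 = false := hc kv.2 (by simp) hv
      have hl' : ∀ x, (some kv.2 : Option Int) = some x → ∀ w ∈ r.map (fun kv => kv.2), w ≤ x := by
        intro x hx w hw
        have : kv.2 = x := by injection hx
        subst this
        exact hhd w hw
      have hc' : ∀ w ∈ r.map (fun kv => kv.2), (some kv.2 : Option Int) ≠ some w →
          (PySem.Dict.insert d kv.2 i).contains w = false := by
        intro w hw hne
        have hwne : w ≠ kv.2 := fun h => hne (by rw [h])
        rw [PySem.Dict.contains_insert]
        have hdw : d.contains w = false := by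
          apply hc w (List.mem_cons_of_mem _ hw)
          intro hlw
          rcases l with _ | y
          · cases hlw
          · have hy : y = w := by injection hlw
            subst hy
            have h1 : kv.2 ≤ y := hl y rfl kv.2 (by simp)
            have h2 : y ≤ kv.2 := hhd y hw
            exact hwne (le_antisymm h2 h1)
        simp [hdw, hwne]
      have hins : (PySem.Dict.insert d kv.2 i).items = d.items ++ [(kv.2, i)] := by
        rw [PySem.Dict.items_insert]
        simp [hfresh]
      have hcdd : cdd l (kv.2 :: r.map (fun kv => kv.2))
          = kv.2 :: cdd (some kv.2) (r.map (fun kv => kv.2)) := by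
        simp [cdd, hv]
      rw [List.foldl_cons, hstep, ih (some kv.2) (PySem.Dict.insert d kv.2 i) (i + 1) hpr hl' hc',
        hins, hcdd, PySem.List.enumerate_cons]
      simp

-- shifting the enumeration start by one is the same as adding one to each index
lemma enum_shift (xs : List Int) : ∀ (s : Int),
    (PySem.List.enumerate xs (s + 1)).map (fun iv => (iv.2, iv.1))
      = (PySem.List.enumerate xs s).map (fun iv => (iv.2, iv.1 + 1)) := by
  induction xs with
  | nil => intro s; simp [PySem.List.enumerate_nil]
  | cons x r ih => intro s; simp [PySem.List.enumerate_cons, ih (s + 1)]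

-- ===== VERDICT (by name: the statement is the Claim_ definition above) =====
theorem make_rank_dict_spec : Claim_equal_make_rank_dict := by
  intro cd _
  unfold Spec_make_rank_dict make_rank_dict make_rank_dict_alt
  set s := PySem.List.sorted cd (fun item => item.2) true with hs
  set vs := s.map (fun kv => kv.2) with hvs
  have hp : vs.Pairwise (fun a b => b ≤ a) := by
    rw [hvs, List.pairwise_map]
    exact PySem.List.sorted_pairwise_rev cd (fun item => item.2)
  have hl0 : ∀ x, (none : Option Int) = some x → ∀ v ∈ vs, v ≤ x := by intro x hx; cases hx
  have hA := foldA_items s none PySem.Dict.empty 1 hp hl0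
    (by intro v _ _; exact PySem.Dict.contains_empty v)
  have hgt := cdd_pairwise_gt vs none hp hl0
  have hnodup : (cdd none vs).Nodup := hgt.imp (fun h => by omega)
  have hsvals : PySem.List.sorted (PySem.Set.ofList (cd.map (fun kv => kv.2))) (fun v => v) true
      = cdd none vs := by
    apply PySem.List.sorted_rev_eq_of_perm_of_pairwise_gt
    · rw [List.perm_ext_iff_of_nodup hnodup (PySem.Set.nodup_ofList _)]
      intro x
      rw [cdd_mem vs none hp hl0 x, PySem.Set.mem_ofList]
      have hmem : x ∈ vs ↔ x ∈ cd.map (fun kv => kv.2) := by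
        rw [hvs, hs]
        exact List.Perm.mem_iff (List.Perm.map _ (PySem.List.sorted_perm cd _ _))
      simp [hmem]
    · exact hgt.imp (fun h => h)
  have hB := PySem.Dict.items_foldl_insert_fresh
    (l := PySem.List.enumerate (cdd none vs))
    (k := fun iv => iv.2) (v := fun iv => iv.1 + 1) (d := PySem.Dict.empty)
    (by intro a _; exact PySem.Dict.contains_empty _)
    (by rw [PySem.List.map_snd_enumerate]; exact hnodup)
  have hshift := enum_shift (cdd none vs) 0
  norm_num at hshift
  rw [hA, hsvals, hB, hshift]
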